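-- pv_equiv track=rewrite | github.com/crazyUFO/solanaBot | utils.py | transfer_time_consistency_check
-- ===== SOURCE A (Python) =====
-- def transfer_time_consistency_check(data,time_range,allowed_times):
--     '''
--     持有者检测-转账时间一致性检测
--     data 是数据
--     allowed_times 是允许次数
--     max_time_diff 为时间差，time_range是时间范围，比如1秒时间差，
--     和1秒内的区别 1秒内也就是不允许有时间差就是0，那么设置2秒内，就是允许1秒时间差
--     '''
--     # 定义允许的最大时间差（2秒）
--     max_time_diff = time_range - 1
--
--     # 创建一个字典，根据时间戳分类
--     grouped_data = []
--
--     # 用来存储当前分类的时间戳（可以是第一个元素的时间戳）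
--     current_group = []
--
--     # 遍历数据，将其根据 timestamp 分类
--     for item in data:
--         timestamp = item['native_transfer']['timestamp']
--
--         # 如果当前分组为空，或当前元素与当前分组的最后元素时间差小于等于 max_time_diff
--         if not current_group:
--             current_group.append(item)
--         else:
--             last_item = current_group[-1]
--             last_timestamp = last_item['native_transfer']['timestamp']
--             time_diff = abs(timestamp - last_timestamp)
--
--             if time_diff <= max_time_diff:
--                 current_group.append(item)  # 加入当前组
--             else:
--                 grouped_data.append(current_group)  # 结束当前组，并开始新的一组
--                 current_group = [item]  # 新的分组开始
--
--     # 将最后一个分组加入结果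
--     if current_group:
--         grouped_data.append(current_group)
--     for item in grouped_data:
--         if len(item) > allowed_times:
--             return True
--     return False
-- ===== SOURCE B (Python) =====
-- def transfer_time_consistency_check(data, time_range, allowed_times):
--     max_time_diff = time_range - 1
--     prev = None
--     count = 0
--     for item in data:
--         t = item['native_transfer']['timestamp']
--         if prev is None or abs(t - prev) > max_time_diff:
--             count = 1
--         else:
--             count += 1
--         if count > allowed_times:
--             return True
--         prev = t
--     return False
-- ===== Notes on version B (the rewrite author's own statement) =====
-- stated objective: simpler
-- what changed: Single pass keeping only the previous timestamp and an integer run-count with early return, instead of materialising a grouped_data list of groups and scanning their lengths afterwards.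
import Mathlib
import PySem

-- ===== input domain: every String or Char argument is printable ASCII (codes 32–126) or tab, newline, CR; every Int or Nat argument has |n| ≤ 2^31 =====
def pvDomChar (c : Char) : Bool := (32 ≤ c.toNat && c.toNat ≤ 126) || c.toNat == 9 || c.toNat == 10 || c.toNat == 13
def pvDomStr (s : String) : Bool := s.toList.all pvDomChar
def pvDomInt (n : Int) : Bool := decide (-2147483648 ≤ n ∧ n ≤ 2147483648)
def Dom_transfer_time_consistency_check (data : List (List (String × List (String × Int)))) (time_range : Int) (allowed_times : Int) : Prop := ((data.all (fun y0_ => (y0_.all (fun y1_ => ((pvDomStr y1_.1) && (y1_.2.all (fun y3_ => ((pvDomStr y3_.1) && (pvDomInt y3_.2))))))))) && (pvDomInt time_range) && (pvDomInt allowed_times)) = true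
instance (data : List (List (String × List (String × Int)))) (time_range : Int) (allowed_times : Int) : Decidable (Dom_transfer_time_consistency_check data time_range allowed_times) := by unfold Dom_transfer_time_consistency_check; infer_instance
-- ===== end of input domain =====

-- B replaces A's grouped_data list (build all groups, then scan their lengths) by a single
-- pass keeping only the previous timestamp and an integer run-count, with early return.

-- ===== PORT A =====

-- item['native_transfer']['timestamp'] : first-match assoc lookup (exact for Python dicts);
-- the .getD defaults are never reached on inputs satisfying Pre_ (no KeyError).
def pvTs (item : List (String × List (String × Int))) : Int :=
  (((item.lookup "native_transfer").getD []).lookup "timestamp").getD 0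

-- the 'for item in data' loop of A, state = (grouped_data, current_group)
def pvLoopA (mtd : Int) (grouped : List (List (List (String × List (String × Int)))))
    (current : List (List (String × List (String × Int)))) :
    List (List (String × List (String × Int))) →
      List (List (List (String × List (String × Int)))) × List (List (String × List (String × Int)))
  | [] => (grouped, current)
  | item :: rest =>
    let timestamp := pvTs item
    if current.isEmpty then
      pvLoopA mtd grouped (current ++ [item]) rest
    else
      let last_item := (PySem.List.pyGet? current (-1)).getD []
      let last_timestamp := pvTs last_item
      let time_diff := |timestamp - last_timestamp|
      if time_diff ≤ mtd then
        pvLoopA mtd grouped (current ++ [item]) rest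
      else
        pvLoopA mtd (grouped ++ [current]) [item] rest

-- the tail of A: append the last group if nonempty, then scan the group lengths
def pvFinish (allowed_times : Int)
    (p : List (List (List (String × List (String × Int)))) × List (List (String × List (String × Int)))) : Bool :=
  let grouped := if !p.2.isEmpty then p.1 ++ [p.2] else p.1
  grouped.any (fun g => decide ((g.length : Int) > allowed_times))

def transfer_time_consistency_check (data : List (List (String × List (String × Int)))) (time_range : Int) (allowed_times : Int) : Bool :=
  let max_time_diff := time_range - 1
  pvFinish allowed_times (pvLoopA max_time_diff [] [] data)

-- ===== PORT B =====

-- B's loop: prev = last timestamp (none before the first item), count = current run length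
def pvGoB (mtd allowed : Int) (prev : Option Int) (count : Int) :
    List (List (String × List (String × Int))) → Bool
  | [] => false
  | item :: rest =>
    let t := pvTs item
    let c := match prev with
      | none => 1
      | some p => if |t - p| > mtd then 1 else count + 1
    if c > allowed then true else pvGoB mtd allowed (some t) c rest

def transfer_time_consistency_check_alt (data : List (List (String × List (String × Int)))) (time_range : Int) (allowed_times : Int) : Bool :=
  pvGoB (time_range - 1) allowed_times none 0 data

-- ===== PRECONDITION & SPEC =====
-- Pre_ excludes exactly the inputs on which the Python A raises KeyError (an item lacking
-- the 'native_transfer' key, or its value lacking 'timestamp'); B raises there too.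
def Pre_transfer_time_consistency_check (data : List (List (String × List (String × Int)))) (time_range : Int) (allowed_times : Int) : Prop :=
  data.all (fun item => ((item.lookup "native_transfer").bind (fun d => d.lookup "timestamp")).isSome) = true
instance (data : List (List (String × List (String × Int)))) (time_range : Int) (allowed_times : Int) : Decidable (Pre_transfer_time_consistency_check data time_range allowed_times) := by unfold Pre_transfer_time_consistency_check; infer_instance

def pvWitness_transfer_time_consistency_check : (List (List (String × List (String × Int)))) × Int × Int :=
  ([[("native_transfer", [("timestamp", 3)])], [("native_transfer", [("timestamp", 4)])]], 2, 1)

def Spec_transfer_time_consistency_check (data : List (List (String × List (String × Int)))) (time_range : Int) (allowed_times : Int) (out : Bool) : Prop := out = transfer_time_consistency_check_alt data time_range allowed_times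
instance (data : List (List (String × List (String × Int)))) (time_range : Int) (allowed_times : Int) (out : Bool) : Decidable (Spec_transfer_time_consistency_check data time_range allowed_times out) := by unfold Spec_transfer_time_consistency_check; infer_instance

-- ===== CLAIM (what is proved, stated in full; the proofs are below) =====
def Claim_equal_transfer_time_consistency_check : Prop := ∀ (data : List (List (String × List (String × Int)))) (time_range : Int) (allowed_times : Int), Dom_transfer_time_consistency_check data time_range allowed_times → Pre_transfer_time_consistency_check data time_range allowed_times → Spec_transfer_time_consistency_check data time_range allowed_times (transfer_time_consistency_check data time_range allowed_times)

-- ===== LEMMAS AND PROOFS =====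

-- if some finished group already exceeds allowed, or the current group does, A ends with True
theorem pvLoopA_big (mtd allowed : Int)
    (rest : List (List (String × List (String × Int))))
    (grouped : List (List (List (String × List (String × Int)))))
    (current : List (List (String × List (String × Int))))
    (h : grouped.any (fun g => decide ((g.length : Int) > allowed)) = true ∨
         (current ≠ [] ∧ (current.length : Int) > allowed)) :
    pvFinish allowed (pvLoopA mtd grouped current rest) = true := by
  induction rest generalizing grouped current with
  | nil =>
    rcases h with h | ⟨hne, hlen⟩
    · cases current with
      | nil => simpa [pvLoopA, pvFinish] using h
      | cons c cs => simp [pvLoopA, pvFinish, List.any_append, h]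
    · cases current with
      | nil => exact absurd rfl hne
      | cons c cs =>
        simp only [pvLoopA, pvFinish, List.any_append, List.any_cons, List.any_nil]
        simp only [List.isEmpty_cons, Bool.not_false, if_pos rfl]
        simp [List.any_append]
        right
        simp only [List.length_cons] at hlen
        push_cast at hlen ⊢; omega
  | cons item rest ih =>
    cases current with
    | nil =>
      rcases h with h | ⟨hne, _⟩
      · simp only [pvLoopA, List.isEmpty_nil, if_pos rfl]
        exact ih grouped [item] (Or.inl h)
      · exact absurd rfl hne
    | cons c cs =>
      simp only [pvLoopA, List.isEmpty_cons, Bool.false_eq_true, if_false]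
      split
      · apply ih
        rcases h with h | ⟨_, hlen⟩
        · exact Or.inl h
        · refine Or.inr ⟨by simp, ?_⟩
          simp only [List.length_append, List.length_cons, List.length_nil] at hlen ⊢
          push_cast at hlen ⊢; omega
      · apply ih
        rcases h with h | ⟨_, hlen⟩
        · exact Or.inl (by simp [List.any_append, h])
        · exact Or.inl (by simp [List.any_append]; right; simpa using hlen)

-- main invariant: a nonempty current group written as l ++ [a] (so its last element is a),
-- with its length not yet over allowed, relates A's remaining loop to B's remaining loop
theorem pvLoopA_goB (mtd allowed : Int)
    (rest : List (List (String × List (String × Int))))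
    (grouped : List (List (List (String × List (String × Int)))))
    (l : List (List (String × List (String × Int))))
    (a : List (String × List (String × Int)))
    (hle : (l.length : Int) + 1 ≤ allowed) :
    pvFinish allowed (pvLoopA mtd grouped (l ++ [a]) rest)
      = (grouped.any (fun g => decide ((g.length : Int) > allowed))
          || pvGoB mtd allowed (some (pvTs a)) ((l.length : Int) + 1) rest) := by
  induction rest generalizing grouped l a with
  | nil =>
    simp only [pvLoopA, pvGoB, pvFinish, Bool.or_false]
    have hne : (l ++ [a]).isEmpty = false := by simp
    simp only [hne, Bool.not_false, if_pos rfl, List.any_append, List.any_cons, List.any_nil]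
    have : ¬ ((((l ++ [a]).length : Int)) > allowed) := by
      simp only [List.length_append, List.length_cons, List.length_nil]
      push_cast; omega
    simp [this]
    intro hcon
    exact absurd hle (by omega)
  | cons item rest ih =>
    have hne : (l ++ [a]).isEmpty = false := by simp
    simp only [pvLoopA, hne, Bool.false_eq_true, if_false]
    rw [PySem.List.pyGet?_neg_one_append_singleton]
    simp only [Option.getD_some]
    simp only [pvGoB]
    by_cases hd : |pvTs item - pvTs a| ≤ mtd
    · rw [if_pos hd]
      have hnd : ¬ (|pvTs item - pvTs a| > mtd) := by omega
      rw [if_neg hnd]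
      by_cases hc : (l.length : Int) + 1 + 1 > allowed
      · rw [if_pos hc]
        rw [pvLoopA_big mtd allowed rest grouped ((l ++ [a]) ++ [item])
          (Or.inr ⟨by simp, by simp; push_cast; omega⟩)]
        simp
      · rw [if_neg hc]
        rw [show (l ++ [a]) ++ [item] = (l ++ [a]) ++ [item] from rfl,
          ih grouped (l ++ [a]) item (by
            simp only [List.length_append, List.length_cons, List.length_nil]
            push_cast at hc ⊢; omega)]
        have hlen2 : (((l ++ [a]).length : Int)) + 1 = (l.length : Int) + 1 + 1 := by
          simp only [List.length_append, List.length_cons, List.length_nil]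
          push_cast; ring
        rw [hlen2]
    · rw [if_neg hd]
      have hgt : |pvTs item - pvTs a| > mtd := by omega
      rw [if_pos hgt]
      by_cases h1 : (1 : Int) > allowed
      · rw [if_pos h1]
        rw [pvLoopA_big mtd allowed rest (grouped ++ [l ++ [a]]) [item]
          (Or.inr ⟨by simp, by simpa using h1⟩)]
        simp
      · rw [if_neg h1]
        rw [show [item] = [] ++ [item] from rfl,
          ih (grouped ++ [l ++ [a]]) [] item (by simpa using h1)]
        have h2 : (decide (allowed ≤ (l.length : Int))) = false := by
          simp only [decide_eq_false_iff_not]; omega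
        simp [List.any_append, h2]

-- ===== VERDICT (by name: the statement is the Claim_ definition above) =====
theorem transfer_time_consistency_check_spec : Claim_equal_transfer_time_consistency_check := by
  intro data time_range allowed_times _hdom _hpre
  unfold Spec_transfer_time_consistency_check
  unfold transfer_time_consistency_check transfer_time_consistency_check_alt
  cases data with
  | nil => rfl
  | cons item rest =>
    simp only [pvLoopA, List.isEmpty_nil, if_pos rfl, pvGoB]
    by_cases h1 : (1 : Int) > allowed_times
    · rw [if_pos h1]
      exact pvLoopA_big (time_range - 1) allowed_times rest [] [item]
        (Or.inr ⟨by simp, by simpa using h1⟩)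
    · rw [if_neg h1]
      rw [show ([] : List (List (String × List (String × Int)))) ++ [item] = [item] from rfl] at *
      have := pvLoopA_goB (time_range - 1) allowed_times rest [] [] item (by simpa using h1)
      simpa using this
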